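-- pv_equiv track=rewrite | github.com/flupzor/bijgeschaafd | news/parsers/utils.py | remove_whitespace_after_newline
-- ===== SOURCE A (Python) =====
-- def is_whitespace(c):
--     if c == ' ' or c == '\n':
--         return True
--
--     return False
--
-- def remove_whitespace_after_newline(text):
--     newline = True
--     new_text = u''
--
--     for c in text:
--         if c == '\n':
--             newline = True
--
--         if not is_whitespace(c):
--             newline = False
--
--         if newline and is_whitespace(c):
--             if c == '\n':
--                 new_text += c
--
--             continue
--
--         new_text += c
--
--     return new_text
-- ===== SOURCE B (Python) =====
-- def remove_whitespace_after_newline(text):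
--     return '\n'.join(line.lstrip(' ') for line in text.split('\n'))
-- ===== Notes on version B (the rewrite author's own statement) =====
-- stated objective: idiomatic
-- what changed: Replaced the character-by-character state machine (newline flag, manual string accumulation with continue) by the idiomatic split-on-newline / strip leading spaces of each line / rejoin one-liner.
import Mathlib
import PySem

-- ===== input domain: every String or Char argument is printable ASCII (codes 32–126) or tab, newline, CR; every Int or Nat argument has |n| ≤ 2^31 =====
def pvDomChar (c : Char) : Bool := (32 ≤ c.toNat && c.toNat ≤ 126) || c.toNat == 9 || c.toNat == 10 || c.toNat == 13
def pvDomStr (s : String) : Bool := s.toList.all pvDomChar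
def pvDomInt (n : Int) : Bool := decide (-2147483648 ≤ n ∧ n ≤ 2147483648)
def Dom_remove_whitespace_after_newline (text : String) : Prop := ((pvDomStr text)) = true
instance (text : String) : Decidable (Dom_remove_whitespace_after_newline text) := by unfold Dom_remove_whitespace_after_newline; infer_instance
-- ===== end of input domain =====

-- B replaces A's character-by-character newline-flag state machine by the idiomatic
-- split-on-'\n' / lstrip(' ') each line / rejoin one-liner (same O(n) cost).

-- ===== PORT A =====
def is_whitespace (c : Char) : Bool :=
  if c = ' ' || c = '\n' then true else false

-- the body of A's 'for c in text' loop; state = (newline, new_text)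
def pvStepA (st : Bool × List Char) (c : Char) : Bool × List Char :=
  let nl := if c = '\n' then true else st.1
  let nl := if !(is_whitespace c) then false else nl
  if nl && is_whitespace c then
    (nl, if c = '\n' then st.2 ++ [c] else st.2)  -- append only the newline itself, then continue
  else
    (nl, st.2 ++ [c])

def remove_whitespace_after_newline (text : String) : String :=
  String.ofList (text.toList.foldl pvStepA (true, [])).2

-- ===== PORT B =====
-- line.lstrip(' ') ported by hand: Python's str.lstrip(' ') drops exactly the leading ' ' characters (exact).
def pvLstripSpace (line : String) : String := String.ofList (line.toList.dropWhile (· == ' '))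

-- text.split('\n') is PySem.Chars.splitOn on the code points (sep nonempty, so Python never raises here).
def remove_whitespace_after_newline_alt (text : String) : String :=
  PySem.Str.join "\n"
    (((PySem.Chars.splitOn text.toList ['\n']).map String.ofList).map pvLstripSpace)

-- ===== PRECONDITION & SPEC =====
def Spec_remove_whitespace_after_newline (text : String) (out : String) : Prop := out = remove_whitespace_after_newline_alt text
instance (text : String) (out : String) : Decidable (Spec_remove_whitespace_after_newline text out) := by unfold Spec_remove_whitespace_after_newline; infer_instance

-- ===== CLAIM (what is proved, stated in full; the proofs are below) =====
def Claim_equal_remove_whitespace_after_newline : Prop := ∀ (text : String), Dom_remove_whitespace_after_newline text → Spec_remove_whitespace_after_newline text (remove_whitespace_after_newline text)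

-- ===== LEMMAS AND PROOFS =====

/-- Reference splitter: Python's `s.split('\n')` on code points, structurally. -/
def pvSplitNl : List Char → List (List Char)
  | [] => [[]]
  | c :: cs => if c = '\n' then [] :: pvSplitNl cs else (pvSplitNl cs).modifyHead (c :: ·)

lemma pvSplitNl_ne_nil (cs : List Char) : pvSplitNl cs ≠ [] := by
  induction cs with
  | nil => simp [pvSplitNl]
  | cons c cs ih =>
    simp only [pvSplitNl]
    split_ifs
    · simp
    · cases h : pvSplitNl cs with
      | nil => exact absurd h ih
      | cons a t => simp

lemma pvModifyHead_id (L : List (List Char)) : L.modifyHead (fun x => x) = L := by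
  cases L <;> simp

lemma splitOn_go_nl (fuel : Nat) : ∀ (l cur : List Char) (acc : List (List Char)),
    l.length < fuel →
    PySem.Chars.splitOn.go ['\n'] fuel l cur acc
      = acc.reverse ++ (pvSplitNl l).modifyHead (cur.reverse ++ ·) := by
  induction fuel with
  | zero => intro l cur acc h; omega
  | succ f ih =>
    intro l cur acc h
    cases l with
    | nil => simp [PySem.Chars.splitOn.go, pvSplitNl]
    | cons c rest =>
      by_cases hc : c = '\n'
      · subst hc
        have hpre : List.isPrefixOf ['\n'] ('\n' :: rest) = true := by
          simp [List.isPrefixOf]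
        simp only [PySem.Chars.splitOn.go, hpre, if_pos]
        rw [show List.drop ['\n'].length ('\n' :: rest) = rest from rfl]
        rw [ih rest [] (cur.reverse :: acc) (by simpa using h)]
        simp [pvSplitNl, pvModifyHead_id]
      · have hpre : List.isPrefixOf ['\n'] (c :: rest) = false := by
          simp [List.isPrefixOf]
          exact fun h' => absurd h'.symm hc
        simp only [PySem.Chars.splitOn.go, hpre, Bool.false_eq_true, if_false]
        rw [ih rest (c :: cur) acc (by simpa using h)]
        have hne := pvSplitNl_ne_nil rest
        cases hsp : pvSplitNl rest with
        | nil => exact absurd hsp hne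
        | cons a t => simp [pvSplitNl, hc, hsp, List.modifyHead]

lemma splitOn_eq_pvSplitNl (cs : List Char) :
    PySem.Chars.splitOn cs ['\n'] = pvSplitNl cs := by
  have := splitOn_go_nl (cs.length + 1) cs [] [] (by omega)
  simpa [PySem.Chars.splitOn, pvModifyHead_id] using this

/-- Per-character output of A's loop, with the newline flag explicit. -/
def pvCore : Bool → List Char → List Char
  | _, [] => []
  | nl, c :: cs =>
    if c = '\n' then '\n' :: pvCore true cs
    else if c = ' ' then (if nl then pvCore true cs else ' ' :: pvCore false cs)
    else c :: pvCore false cs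

lemma foldl_eq_core (cs : List Char) : ∀ (nl : Bool) (acc : List Char),
    (cs.foldl pvStepA (nl, acc)).2 = acc ++ pvCore nl cs := by
  induction cs with
  | nil => intro nl acc; simp [pvCore]
  | cons c cs ih =>
    intro nl acc
    rw [List.foldl_cons]
    by_cases h1 : c = '\n'
    · subst h1
      rw [show pvStepA (nl, acc) '\n' = (true, acc ++ ['\n']) from by
        simp [pvStepA, is_whitespace]]
      rw [ih, pvCore]
      simp
    · by_cases h2 : c = ' '
      · subst h2
        cases nl with
        | true =>
          rw [show pvStepA (true, acc) ' ' = (true, acc) from by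
            simp [pvStepA, is_whitespace]]
          rw [ih, pvCore]
          simp
        | false =>
          rw [show pvStepA (false, acc) ' ' = (false, acc ++ [' ']) from by
            simp [pvStepA, is_whitespace]]
          rw [ih, pvCore]
          simp
      · have hws : is_whitespace c = false := by simp [is_whitespace, h1, h2]
        rw [show pvStepA (nl, acc) c = (false, acc ++ [c]) from by
          simp [pvStepA, hws]]
        rw [ih, pvCore]
        simp [h1, h2]

def pvStrip (l : List Char) : List Char := l.dropWhile (· == ' ')

/-- A's output on a line-by-line reading: flag true strips every line,
    flag false keeps the first line verbatim and strips the rest. -/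
lemma core_eq_join (cs : List Char) :
    pvCore true cs = PySem.Chars.join ['\n'] ((pvSplitNl cs).map pvStrip)
    ∧ pvCore false cs = PySem.Chars.join ['\n']
        ((pvSplitNl cs).headI :: ((pvSplitNl cs).tail.map pvStrip)) := by
  induction cs with
  | nil => simp [pvCore, pvSplitNl, pvStrip, PySem.Chars.join_singleton]
  | cons c cs ih =>
    obtain ⟨ih1, ih2⟩ := ih
    have hne := pvSplitNl_ne_nil cs
    cases hsp : pvSplitNl cs with
    | nil => exact absurd hsp hne
    | cons a t =>
      rw [hsp] at ih1 ih2
      simp only [List.headI, List.tail_cons] at ih2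
      by_cases h1 : c = '\n'
      · subst h1
        constructor <;>
          simp [pvCore, pvSplitNl, hsp, pvStrip, PySem.Chars.join_cons_cons, ih1]
      · by_cases h2 : c = ' '
        · subst h2
          have hstrip : pvStrip (' ' :: a) = pvStrip a := by simp [pvStrip, List.dropWhile]
          constructor
          · simp [pvCore, pvSplitNl, hsp, List.modifyHead, hstrip, ih1]
          · simp only [pvCore, pvSplitNl, hsp, List.modifyHead,
              if_neg (by decide : ¬ (' ' = '\n')), List.headI, List.tail_cons, ih2]
            cases t with
            | nil => simp [PySem.Chars.join_singleton]
            | cons b r => simp [PySem.Chars.join_cons_cons]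
        · have hstrip : pvStrip (c :: a) = c :: a := by
            have hb : (c == ' ') = false := by simp [h2]
            simp [pvStrip, List.dropWhile, hb]
          constructor <;>
          · simp only [pvCore, pvSplitNl, hsp, List.modifyHead, if_neg h1, if_neg h2,
              List.map_cons, hstrip, List.headI, List.tail_cons]
            rw [ih2]
            cases t with
            | nil => simp [PySem.Chars.join_singleton]
            | cons b r => simp [PySem.Chars.join_cons_cons]

-- ===== VERDICT (by name: the statement is the Claim_ definition above) =====
theorem remove_whitespace_after_newline_spec : Claim_equal_remove_whitespace_after_newline := by
  intro text _
  unfold Spec_remove_whitespace_after_newline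
  unfold remove_whitespace_after_newline remove_whitespace_after_newline_alt
  have hj : (PySem.Str.join "\n"
      (((PySem.Chars.splitOn text.toList ['\n']).map String.ofList).map pvLstripSpace)).toList
      = (text.toList.foldl pvStepA (true, [])).2 := by
    rw [PySem.Str.toList_join, foldl_eq_core, splitOn_eq_pvSplitNl, List.nil_append,
      (core_eq_join text.toList).1]
    congr 1
    simp [pvLstripSpace, pvStrip, Function.comp]
  calc String.ofList (text.toList.foldl pvStepA (true, [])).2
      = String.ofList (PySem.Str.join "\n"
          (((PySem.Chars.splitOn text.toList ['\n']).map String.ofList).map pvLstripSpace)).toList := by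
        rw [hj]
    _ = _ := String.ofList_toList
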